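-- pv_equiv track=rewrite | github.com/tokyomain/Learn-to-Code-by-Solving-Problems---Python | Chapter_6/Practice_ex/ex1_1987_2013.py | have_doubles
-- ===== SOURCE A (Python) =====
-- def have_doubles(year):
--     year = str(year)
--     lst = []
--     for ch in year:
--         if ch not in lst:
--             lst.append(ch)
--         else:
--             doubles = 'yes'
--             return doubles
--     doubles = 'no'
--     return doubles
-- ===== SOURCE B (Python) =====
-- def have_doubles(year):
--     s = str(year)
--     return 'yes' if len(set(s)) != len(s) else 'no'
-- ===== Notes on version B (the rewrite author's own statement) =====
-- stated objective: simpler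
-- what changed: Replaces the incremental seen-list loop with early return by a single whole-string distinct-count (len(set(s)) vs len(s)) comparison, removing the loop and branches entirely.
import Mathlib
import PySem

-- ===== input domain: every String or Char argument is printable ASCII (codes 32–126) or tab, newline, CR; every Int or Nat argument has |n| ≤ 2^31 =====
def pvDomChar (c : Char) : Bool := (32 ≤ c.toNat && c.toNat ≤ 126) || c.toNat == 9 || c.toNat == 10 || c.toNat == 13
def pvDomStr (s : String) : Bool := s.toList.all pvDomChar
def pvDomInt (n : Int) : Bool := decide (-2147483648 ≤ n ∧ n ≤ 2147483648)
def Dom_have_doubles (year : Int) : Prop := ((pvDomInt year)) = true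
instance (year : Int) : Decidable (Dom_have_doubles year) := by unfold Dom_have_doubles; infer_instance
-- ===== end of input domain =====

-- B replaces A's incremental seen-list loop with early exit by a single distinct-count
-- (len(set(s)) vs len(s)) comparison: simpler, no loop or branches.


-- ===== PORT A =====
-- A's loop: scan the characters, keep a list of seen characters, return "yes" on
-- the first repeat (early return), "no" after the loop.
def have_doubles_loop : List Char → List Char → String
  | [], _ => "no"
  | c :: rest, seen => if c ∈ seen then "yes" else have_doubles_loop rest (seen ++ [c])

def have_doubles (year : Int) : String :=
  have_doubles_loop (PySem.Int.toStr year).toList []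

-- ===== PORT B =====
-- B: 'yes' if len(set(s)) != len(s) else 'no'
def have_doubles_alt (year : Int) : String :=
  let s := (PySem.Int.toStr year).toList
  if PySem.Set.len (PySem.Set.ofList s) ≠ (s.length : Int) then "yes" else "no"

-- ===== PRECONDITION & SPEC =====
def Spec_have_doubles (year : Int) (out : String) : Prop := out = have_doubles_alt year
instance (year : Int) (out : String) : Decidable (Spec_have_doubles year out) := by unfold Spec_have_doubles; infer_instance

-- ===== CLAIM (what is proved, stated in full; the proofs are below) =====
def Claim_equal_have_doubles : Prop := ∀ (year : Int), Dom_have_doubles year → Spec_have_doubles year (have_doubles year)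

-- ===== LEMMAS AND PROOFS =====

-- an element added to the set grows it by at most one
theorem pv_len_add_le (acc : List Char) (c : Char) :
    (PySem.Set.add acc c).length ≤ acc.length + 1 := by
  unfold PySem.Set.add
  split <;> simp

-- the set built by folding add grows by at most the number of elements folded in
theorem pv_len_foldl_le (s : List Char) : ∀ (acc : List Char),
    (s.foldl PySem.Set.add acc).length ≤ acc.length + s.length := by
  induction s with
  | nil => intro acc; simp
  | cons c rest ih =>
      intro acc
      calc ((c :: rest).foldl PySem.Set.add acc).length
          = (rest.foldl PySem.Set.add (PySem.Set.add acc c)).length := by simp [List.foldl]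
        _ ≤ (PySem.Set.add acc c).length + rest.length := ih _
        _ ≤ acc.length + 1 + rest.length := by
              have := pv_len_add_le acc c; omega
        _ = acc.length + (c :: rest).length := by simp; omega

-- the fold reaches full length exactly when the accumulated list stays duplicate-free
theorem pv_len_foldl_iff (s : List Char) : ∀ (acc : List Char), acc.Nodup →
    ((s.foldl PySem.Set.add acc).length = acc.length + s.length ↔ (acc ++ s).Nodup) := by
  induction s with
  | nil => intro acc hacc; simp [hacc]
  | cons c rest ih =>
      intro acc hacc
      by_cases hc : c ∈ acc
      · have hadd : PySem.Set.add acc c = acc := by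
          unfold PySem.Set.add; simp [hc]
        constructor
        · intro h
          exfalso
          have hle := pv_len_foldl_le rest acc
          simp only [List.foldl, hadd] at h
          simp at h
          omega
        · intro h
          exfalso
          rcases (List.nodup_append.mp h) with ⟨_, _, hdisj⟩
          exact hdisj c hc c (by simp) rfl
      · have hadd : PySem.Set.add acc c = acc ++ [c] := by
          unfold PySem.Set.add; simp [hc]
        have hacc' : (acc ++ [c]).Nodup := by
          rw [List.nodup_append]
          refine ⟨hacc, by simp, ?_⟩
          intro a ha b hb
          simp at hb; subst hb
          intro h; subst h; exact hc ha
        have hthis := ih (acc ++ [c]) hacc'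
        have h2 : acc ++ [c] ++ rest = acc ++ c :: rest := by simp
        rw [h2] at hthis
        have h3 : (acc ++ [c]).length + rest.length = acc.length + (c :: rest).length := by
          simp; omega
        rw [h3] at hthis
        simp only [List.foldl, hadd]
        exact hthis

-- A's loop computed in closed form: "no" exactly when no repeat appears
theorem pv_loop_eq (s : List Char) : ∀ (acc : List Char), acc.Nodup →
    have_doubles_loop s acc = if (acc ++ s).Nodup then "no" else "yes" := by
  induction s with
  | nil => intro acc hacc; simp [have_doubles_loop, hacc]
  | cons c rest ih =>
      intro acc hacc
      by_cases hc : c ∈ acc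
      · have : ¬ (acc ++ c :: rest).Nodup := by
          intro h
          rcases (List.nodup_append.mp h) with ⟨_, _, hdisj⟩
          exact hdisj c hc c (by simp) rfl
        simp [have_doubles_loop, hc, this]
      · have hacc' : (acc ++ [c]).Nodup := by
          rw [List.nodup_append]
          refine ⟨hacc, by simp, ?_⟩
          intro a ha b hb
          simp at hb; subst hb
          intro h; subst h; exact hc ha
        rw [show have_doubles_loop (c :: rest) acc = have_doubles_loop rest (acc ++ [c]) by
          simp [have_doubles_loop, hc]]
        rw [ih _ hacc']
        congr 1
        simp [List.append_assoc]

-- ===== VERDICT (by name: the statement is the Claim_ definition above) =====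
theorem have_doubles_spec : Claim_equal_have_doubles := by
  intro year _
  unfold Spec_have_doubles have_doubles have_doubles_alt
  set s := (PySem.Int.toStr year).toList with hs
  rw [pv_loop_eq s [] List.nodup_nil]
  simp only [List.nil_append]
  have hiff := pv_len_foldl_iff s [] List.nodup_nil
  simp only [List.length_nil, Nat.zero_add, List.nil_append] at hiff
  by_cases hnd : s.Nodup
  · have hlen : (PySem.Set.ofList s).length = s.length := by
      unfold PySem.Set.ofList PySem.Set.empty; exact hiff.mpr hnd
    simp [hnd, PySem.Set.len, hlen]
  · have hlen : (PySem.Set.ofList s).length ≠ s.length := by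
      unfold PySem.Set.ofList PySem.Set.empty
      intro h; exact hnd (hiff.mp h)
    simp only [hnd, if_false, PySem.Set.len]
    rw [if_pos]
    exact fun h => hlen (by exact_mod_cast h)
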